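-- pv_equiv track=rewrite | github.com/vlad-a-c/PlayPalace11 | server/games/tradeoff/bot.py | _select_keep_indices
-- ===== SOURCE A (Python) =====
-- def _select_keep_indices(
--     rolled_dice: list[int], counts: dict[int, int], min_keeps: int
-- ) -> list[int]:
--     desired_keeps = [
--         i for i, value in enumerate(rolled_dice) if counts.get(value, 0) > 1
--     ]
--     if len(desired_keeps) >= min_keeps:
--         return desired_keeps
--
--     sorted_dice = sorted(
--         enumerate(rolled_dice),
--         key=lambda x: counts.get(x[1], 0),
--         reverse=True,
--     )
--     for i, _ in sorted_dice:
--         if i not in desired_keeps: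
--             desired_keeps.append(i)
--             if len(desired_keeps) >= min_keeps:
--                 break
--     return desired_keeps
-- ===== SOURCE B (Python) =====
-- def _select_keep_indices(
--     rolled_dice: list[int], counts: dict[int, int], min_keeps: int
-- ) -> list[int]:
--     cnt = [counts.get(v, 0) for v in rolled_dice]
--     keep = [i for i, c in enumerate(cnt) if c > 1]
--     if len(keep) >= min_keeps:
--         return keep
--     rest = [i
--             for c in sorted({c for c in cnt if c <= 1}, reverse=True)
--             for i, cc in enumerate(cnt) if cc == c]
--     return keep + rest[:min_keeps - len(keep)]
-- ===== Notes on version B (the rewrite author's own statement) =====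
-- stated objective: faster
-- what changed: A sorts all (index,value) pairs by count and fills up with a linear membership scan over the growing keep list inside an early-break loop; B never sorts the dice and never scans for membership: it precomputes the count list, partitions the leftover indices into buckets grouped by the distinct count values (sorted descending), and returns keep plus a slice of the concatenated buckets.
import Mathlib
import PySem

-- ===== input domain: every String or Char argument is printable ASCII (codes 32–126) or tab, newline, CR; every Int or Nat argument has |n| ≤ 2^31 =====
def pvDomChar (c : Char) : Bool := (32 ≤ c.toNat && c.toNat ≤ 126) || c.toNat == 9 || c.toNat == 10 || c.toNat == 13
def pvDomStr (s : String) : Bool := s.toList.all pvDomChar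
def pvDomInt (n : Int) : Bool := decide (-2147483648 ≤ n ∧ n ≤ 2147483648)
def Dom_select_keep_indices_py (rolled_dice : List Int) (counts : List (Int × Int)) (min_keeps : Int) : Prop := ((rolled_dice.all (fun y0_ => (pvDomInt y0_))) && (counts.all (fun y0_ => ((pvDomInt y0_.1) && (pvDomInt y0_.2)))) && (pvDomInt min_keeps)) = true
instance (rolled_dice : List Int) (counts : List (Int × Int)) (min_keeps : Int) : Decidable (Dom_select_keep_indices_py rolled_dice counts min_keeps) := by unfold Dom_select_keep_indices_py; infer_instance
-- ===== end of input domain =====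

-- B replaces A's full comparison sort plus membership-scanned fill loop by a group-by over the
-- distinct low count values (objective: faster, the quadratic membership-scan fill loop disappears; same return value, proved below).



-- ===== PORT A =====
-- literal transliteration of _select_keep_indices (comprehension; sorted(..., reverse=True); fill loop with early break)
def pvLoopA (min_keeps : Int) : List (Int × Int) → List Int → List Int
  | [], desired => desired
  | (i, _) :: t, desired =>
    if i ∈ desired then pvLoopA min_keeps t desired
    else
      let d' := desired ++ [i]
      if min_keeps ≤ (d'.length : Int) then d' else pvLoopA min_keeps t d'

def select_keep_indices_py (rolled_dice : List Int) (counts : List (Int × Int)) (min_keeps : Int) : List Int :=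
  let desired_keeps := ((PySem.List.enumerate rolled_dice).filter
      (fun p => decide (1 < PySem.Dict.getD (PySem.Dict.mk counts) p.2 0))).map (·.1)
  if min_keeps ≤ (desired_keeps.length : Int) then desired_keeps
  else
    let sorted_dice := PySem.List.sorted (PySem.List.enumerate rolled_dice)
        (fun x => PySem.Dict.getD (PySem.Dict.mk counts) x.2 0) true
    pvLoopA min_keeps sorted_dice desired_keeps

-- ===== PORT B =====
-- transliteration of Source B: count list, keep comprehension, group-by over the distinct low counts, slice
def select_keep_indices_py_alt (rolled_dice : List Int) (counts : List (Int × Int)) (min_keeps : Int) : List Int :=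
  let cnt := rolled_dice.map (fun v => PySem.Dict.getD (PySem.Dict.mk counts) v 0)
  let keep := ((PySem.List.enumerate cnt).filter (fun p => decide (1 < p.2))).map (·.1)
  if min_keeps ≤ (keep.length : Int) then keep
  else
    let rest := (PySem.List.sorted (PySem.Set.ofList (cnt.filter (fun c => decide (c ≤ 1))))
        (fun c => c) true).flatMap
        (fun c => ((PySem.List.enumerate cnt).filter (fun p => p.2 == c)).map (·.1))
    keep ++ PySem.List.slice rest none (some (min_keeps - (keep.length : Int)))

-- ===== PRECONDITION & SPEC =====
def Spec_select_keep_indices_py (rolled_dice : List Int) (counts : List (Int × Int)) (min_keeps : Int) (out : List Int) : Prop := out = select_keep_indices_py_alt rolled_dice counts min_keeps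
instance (rolled_dice : List Int) (counts : List (Int × Int)) (min_keeps : Int) (out : List Int) : Decidable (Spec_select_keep_indices_py rolled_dice counts min_keeps out) := by unfold Spec_select_keep_indices_py; infer_instance

-- ===== CLAIM (what is proved, stated in full; the proofs are below) =====
def Claim_equal_select_keep_indices_py : Prop := ∀ (rolled_dice : List Int) (counts : List (Int × Int)) (min_keeps : Int), Dom_select_keep_indices_py rolled_dice counts min_keeps → Spec_select_keep_indices_py rolled_dice counts min_keeps (select_keep_indices_py rolled_dice counts min_keeps)

-- ===== LEMMAS AND PROOFS =====
-- ---- enumerate facts ----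
theorem pv_enum_snd {α : Type} (xs : List α) (s : Int) :
    (PySem.List.enumerate xs s).map Prod.snd = xs := by
  induction xs generalizing s with
  | nil => simp [PySem.List.enumerate]
  | cons x t ih => simp [PySem.List.enumerate, ih]

theorem pv_enum_map {α β : Type} (f : α → β) (xs : List α) (s : Int) :
    PySem.List.enumerate (xs.map f) s = (PySem.List.enumerate xs s).map (fun p => (p.1, f p.2)) := by
  induction xs generalizing s with
  | nil => simp [PySem.List.enumerate]
  | cons x t ih => simp [PySem.List.enumerate, ih]

theorem pv_enum_ge {α : Type} (xs : List α) (s : Int) :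
    ∀ p ∈ PySem.List.enumerate xs s, s ≤ p.1 := by
  induction xs generalizing s with
  | nil => simp [PySem.List.enumerate]
  | cons x t ih =>
    intro p hp
    simp only [PySem.List.enumerate, List.mem_cons] at hp
    rcases hp with h | h
    · simp [h]
    · have := ih (s + 1) p h; omega

theorem pv_enum_fst_nodup {α : Type} (xs : List α) (s : Int) :
    ((PySem.List.enumerate xs s).map Prod.fst).Nodup := by
  induction xs generalizing s with
  | nil => simp [PySem.List.enumerate]
  | cons x t ih =>
    simp only [PySem.List.enumerate, List.map_cons, List.nodup_cons]
    refine ⟨?_, ih (s + 1)⟩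
    intro hmem
    rcases List.mem_map.1 hmem with ⟨p, hp, hfst⟩
    have := pv_enum_ge t (s + 1) p hp
    omega

theorem pv_mem_keep_iff {α : Type} (l : List (Int × α)) (q : Int × α → Bool)
    (hnd : (l.map Prod.fst).Nodup) (p : Int × α) (hp : p ∈ l) :
    p.1 ∈ (l.filter q).map (·.1) ↔ q p = true := by
  constructor
  · intro h
    rcases List.mem_map.1 h with ⟨r, hr, hfst⟩
    have hr' := List.mem_filter.1 hr
    have : r = p := List.inj_on_of_nodup_map hnd hr'.1 hp hfst
    exact this ▸ hr'.2
  · intro h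
    exact List.mem_map.2 ⟨p, List.mem_filter.2 ⟨hp, h⟩, rfl⟩

-- ---- insertBy facts ----
theorem pv_insertBy_skip {α : Type} (bef : α → α → Bool) (x : α) (pre suf : List α)
    (h : ∀ a ∈ pre, bef x a = false) :
    PySem.List.insertBy bef x (pre ++ suf) = pre ++ PySem.List.insertBy bef x suf := by
  induction pre with
  | nil => simp
  | cons a t ih =>
    have ha : bef x a = false := h a (by simp)
    simp only [List.cons_append, PySem.List.insertBy, ha]
    simp only [Bool.false_eq_true, if_false]
    rw [ih (fun b hb => h b (by simp [hb]))]

theorem pv_insertBy_head {α : Type} (bef : α → α → Bool) (x : α) (suf : List α)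
    (h : ∀ a ∈ suf, bef x a = true) :
    PySem.List.insertBy bef x suf = x :: suf := by
  cases suf with
  | nil => rfl
  | cons a t => simp [PySem.List.insertBy, h a (by simp)]

-- ---- flatMap facts ----
theorem pv_flatMap_ite {α β : Type} (D : List α) (p : α → Bool) (g : α → List β) :
    (D.flatMap fun c => if p c then g c else []) = (D.filter p).flatMap g := by
  induction D with
  | nil => rfl
  | cons c t ih =>
    by_cases hc : p c = true
    · simp [List.flatMap_cons, hc, ih]
    · simp only [Bool.not_eq_true] at hc
      simp [List.flatMap_cons, hc, ih]

theorem pv_flatMap_congr {α β : Type} (D : List α) (f g : α → List β)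
    (h : ∀ c ∈ D, f c = g c) : D.flatMap f = D.flatMap g := by
  induction D with
  | nil => rfl
  | cons c t ih =>
    simp only [List.flatMap_cons, h c (by simp)]
    rw [ih (fun c hc => h c (by simp [hc]))]

-- ---- A's fill loop ----
theorem pv_loopA_spec (mk : Int) (l : List (Int × Int)) : ∀ (d : List Int),
    (l.map Prod.fst).Nodup → (d.length : Int) < mk →
    pvLoopA mk l d = d ++ ((l.map Prod.fst).filter (fun i => decide (i ∉ d))).take (mk - d.length).toNat := by
  induction l with
  | nil => intro d _ _; simp [pvLoopA]
  | cons p t ih =>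
    rcases p with ⟨i, v⟩
    intro d hnd hlt
    simp only [List.map_cons, List.nodup_cons] at hnd
    by_cases hmem : i ∈ d
    · simp only [pvLoopA, if_pos hmem]
      rw [ih d hnd.2 hlt]
      simp [hmem]
    · have hstep : (d ++ [i]).length = d.length + 1 := by simp
      by_cases hdone : mk ≤ ((d ++ [i]).length : Int)
      · have hk : (mk - (d.length : Int)).toNat = 1 := by simp at hdone ⊢; omega
        simp only [pvLoopA, if_neg hmem, if_pos hdone]
        simp [hmem, hk]
      · have hlt' : (((d ++ [i]).length : Int)) < mk := by omega
        simp only [pvLoopA, if_neg hmem, if_neg hdone]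
        rw [ih (d ++ [i]) hnd.2 hlt']
        have hfeq : (t.map Prod.fst).filter (fun j => decide (j ∉ d ++ [i]))
            = (t.map Prod.fst).filter (fun j => decide (j ∉ d)) := by
          apply List.filter_congr
          intro j hj
          have hji : j ≠ i := fun h => hnd.1 (h ▸ hj)
          simp [List.mem_append, hji]
        rw [hfeq]
        have hk : (mk - (d.length : Int)).toNat = ((mk - ((d ++ [i]).length : Int)).toNat) + 1 := by
          simp at hlt' ⊢; omega
        simp [hmem, hk, List.take_succ_cons]

-- ---- grouped form of the reverse stable sort ----
def pvGroups {α : Type} (key : α → Int) (l : List α) : List α :=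
  (PySem.List.sorted (PySem.Set.ofList (l.map key)) (fun c => c) true).flatMap
    (fun c => l.filter (fun a => key a == c))

theorem pv_sorted_set_nodup (lk : List Int) :
    (PySem.List.sorted (PySem.Set.ofList lk) (fun c => c) true).Nodup :=
  (PySem.List.sorted_perm (PySem.Set.ofList lk) (fun c => c) true).nodup_iff.2
    (PySem.Set.nodup_ofList lk)

theorem pv_sorted_set_pairwise_gt (lk : List Int) :
    (PySem.List.sorted (PySem.Set.ofList lk) (fun c => c) true).Pairwise (fun a b => b < a) := by
  have h1 := PySem.List.sorted_pairwise_rev (PySem.Set.ofList lk) (fun c => c)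
  have h2 : (PySem.List.sorted (PySem.Set.ofList lk) (fun c => c) true).Pairwise (· ≠ ·) :=
    pv_sorted_set_nodup lk
  exact (h1.and h2).imp (fun h => lt_of_le_of_ne h.1 (Ne.symm h.2))

theorem pv_bucket_key {α : Type} (key : α → Int) (l : List α) (c : Int) :
    ∀ a ∈ l.filter (fun a => key a == c), key a = c := by
  intro a ha
  exact beq_iff_eq.1 (List.mem_filter.1 ha).2

theorem pv_dropWhile_head_false {α : Type} (p : α → Bool) (l : List α) (b : α) (R : List α)
    (h : l.dropWhile p = b :: R) : p b = false := by
  induction l with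
  | nil => simp at h
  | cons a t ih =>
    by_cases hp : p a = true
    · rw [List.dropWhile_cons_of_pos hp] at h
      exact ih h
    · have hpa : p a = false := by simpa using hp
      rw [List.dropWhile_cons_of_neg (by simp [hpa])] at h
      obtain ⟨h1, h2⟩ := List.cons_eq_cons.mp h
      rw [← h1]
      exact hpa

theorem pv_dropWhile_lt (c0 : Int) (D : List Int) (hp : D.Pairwise (fun a b => b < a))
    (hn : c0 ∉ D) : ∀ c ∈ D.dropWhile (fun c => decide (c0 < c)), c < c0 := by
  cases hE : D.dropWhile (fun c => decide (c0 < c)) with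
  | nil => simp
  | cons b R =>
    have hb : ¬ c0 < b := by
      simpa using pv_dropWhile_head_false _ _ _ _ hE
    have hbD : b ∈ D := (List.dropWhile_sublist _).subset (by rw [hE]; exact List.mem_cons_self ..)
    have hbne : b ≠ c0 := fun he => hn (he ▸ hbD)
    have hblt : b < c0 := lt_of_le_of_ne (not_lt.1 hb) hbne
    have hpR : (b :: R).Pairwise (fun a b => b < a) :=
      hE ▸ List.Pairwise.sublist (List.dropWhile_sublist _) hp
    intro c hc
    rcases List.mem_cons.1 hc with h | h
    · omega
    · have h1 : c < b := (List.pairwise_cons.1 hpR).1 c h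
      omega

theorem pv_dropWhile_mem (c0 : Int) (D : List Int) (hp : D.Pairwise (fun a b => b < a))
    (hm : c0 ∈ D) :
    ∃ R, D.dropWhile (fun c => decide (c0 < c)) = c0 :: R ∧ ∀ c ∈ R, c < c0 := by
  have hsplit : D.takeWhile (fun c => decide (c0 < c)) ++ D.dropWhile (fun c => decide (c0 < c)) = D :=
    List.takeWhile_append_dropWhile
  have hnotT : c0 ∉ D.takeWhile (fun c => decide (c0 < c)) := by
    intro h
    exact lt_irrefl c0 (of_decide_eq_true (List.mem_takeWhile_imp (p := fun c => decide (c0 < c)) h))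
  have hmemd : c0 ∈ D.dropWhile (fun c => decide (c0 < c)) := by
    have hm' := hm
    rw [← hsplit] at hm'
    rcases List.mem_append.1 hm' with h | h
    · exact absurd h hnotT
    · exact h
  cases hE : D.dropWhile (fun c => decide (c0 < c)) with
  | nil => rw [hE] at hmemd; simp at hmemd
  | cons b R =>
    have hb : ¬ c0 < b := by
      simpa using pv_dropWhile_head_false _ _ _ _ hE
    have hpR : (b :: R).Pairwise (fun a b => b < a) :=
      hE ▸ List.Pairwise.sublist (List.dropWhile_sublist _) hp
    have hbc0 : b = c0 := by
      rw [hE] at hmemd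
      rcases List.mem_cons.1 hmemd with h | h
      · exact h.symm
      · exact absurd ((List.pairwise_cons.1 hpR).1 c0 h) hb
    subst hbc0
    exact ⟨R, rfl, (List.pairwise_cons.1 hpR).1⟩

theorem pv_insert_groups {α : Type} (key : α → Int) (l : List α) (x : α) :
    PySem.List.insertBy (fun a b => decide (key b < key a)) x (pvGroups key l)
      = pvGroups key (l ++ [x]) := by
  have hbkt : ∀ c : Int, (l ++ [x]).filter (fun a => key a == c)
      = l.filter (fun a => key a == c) ++ (if key x == c then [x] else []) := by
    intro c
    rw [List.filter_append]
    congr 1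
    by_cases h : key x == c <;> simp [h]
  have hD := pv_sorted_set_pairwise_gt (l.map key)
  set D := PySem.List.sorted (PySem.Set.ofList (l.map key)) (fun c => c) true with hDdef
  have hperm : D.Perm (PySem.Set.ofList (l.map key)) := by
    rw [hDdef]; exact PySem.List.sorted_perm _ _ _
  have hTR : D.takeWhile (fun c => decide (key x < c))
      ++ D.dropWhile (fun c => decide (key x < c)) = D := List.takeWhile_append_dropWhile
  set T := D.takeWhile (fun c => decide (key x < c)) with hTdef
  set Rd := D.dropWhile (fun c => decide (key x < c)) with hRdef
  have hT : ∀ c ∈ T, key x < c := by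
    intro c hc
    rw [hTdef] at hc
    exact of_decide_eq_true (List.mem_takeWhile_imp (p := fun c => decide (key x < c)) hc)
  have hpairRd : Rd.Pairwise (fun a b : Int => b < a) := by
    rw [hRdef]; exact List.Pairwise.sublist (List.dropWhile_sublist _) hD
  have hcross : ∀ a ∈ T, ∀ b ∈ Rd, b < a := (List.pairwise_append.1 (hTR.symm ▸ hD)).2.2
  have hskipT : ∀ a ∈ T.flatMap (fun c => l.filter (fun a => key a == c)),
      (fun a b => decide (key b < key a)) x a = false := by
    intro a ha
    rcases List.mem_flatMap.1 ha with ⟨c, hc, hac⟩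
    have h1 := pv_bucket_key key l c a hac
    have h2 := hT c hc
    simp only [decide_eq_false_iff_not, not_lt]
    omega
  have hTcongr : ∀ c ∈ T,
      (fun c => l.filter (fun a => key a == c) ++ (if key x == c then [x] else [])) c
        = (fun c => l.filter (fun a => key a == c)) c := by
    intro c hc
    have hne : (key x == c) = false := by
      have := hT c hc
      simp only [beq_eq_false_iff_ne, ne_eq]
      omega
    simp [hne]
  have hmapkey : (l ++ [x]).map key = l.map key ++ [key x] := by simp
  by_cases hmem : key x ∈ l.map key
  · -- existing key: the distinct-key list is unchanged; x lands at the end of its bucket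
    have hS : PySem.Set.ofList ((l ++ [x]).map key) = PySem.Set.ofList (l.map key) := by
      rw [hmapkey, PySem.Set.ofList_eq_foldl, List.foldl_append, ← PySem.Set.ofList_eq_foldl,
        List.foldl_cons, List.foldl_nil]
      have hc : List.contains (PySem.Set.ofList (l.map key)) (key x) = true := by
        simp only [List.contains_eq_mem, decide_eq_true_eq]
        exact (PySem.Set.mem_ofList _ _).2 hmem
      unfold PySem.Set.add PySem.Set.contains
      rw [hc]
      simp
    have hc0D : key x ∈ D := by
      rw [hDdef, PySem.List.mem_sorted]
      exact (PySem.Set.mem_ofList _ _).2 hmem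
    obtain ⟨R, hcons, hRlt⟩ := pv_dropWhile_mem (key x) D hD hc0D
    rw [← hRdef] at hcons
    unfold pvGroups
    rw [hS, ← hDdef, ← hTR, hcons]
    simp only [List.flatMap_append, List.flatMap_cons]
    rw [← List.append_assoc]
    rw [pv_insertBy_skip _ _ _ _ (by
      intro a ha
      rcases List.mem_append.1 ha with ha | ha
      · exact hskipT a ha
      · have := pv_bucket_key key l (key x) a ha
        simp [this])]
    rw [pv_insertBy_head _ _ _ (by
      intro a ha
      rcases List.mem_flatMap.1 ha with ⟨c, hc, hac⟩
      have h1 := pv_bucket_key key l c a hac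
      have h2 := hRlt c hc
      simp only [decide_eq_true_eq]
      omega)]
    simp only [hbkt]
    rw [pv_flatMap_congr T
      (fun c => l.filter (fun a => key a == c) ++ (if key x == c then [x] else []))
      (fun c => l.filter (fun a => key a == c)) hTcongr]
    rw [pv_flatMap_congr R
      (fun c => l.filter (fun a => key a == c) ++ (if key x == c then [x] else []))
      (fun c => l.filter (fun a => key a == c)) (by
        intro c hc
        have hne : (key x == c) = false := by
          have := hRlt c hc
          simp only [beq_eq_false_iff_ne, ne_eq]
          omega
        simp [hne])]
    simp
  · -- fresh key: it is inserted between the larger and the smaller distinct keys, bucket [x]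
    have hS : PySem.Set.ofList ((l ++ [x]).map key)
        = PySem.Set.ofList (l.map key) ++ [key x] := by
      rw [hmapkey, PySem.Set.ofList_eq_foldl, List.foldl_append, ← PySem.Set.ofList_eq_foldl,
        List.foldl_cons, List.foldl_nil]
      have hc : List.contains (PySem.Set.ofList (l.map key)) (key x) = false := by
        simp only [List.contains_eq_mem, decide_eq_false_iff_not]
        exact fun h => hmem ((PySem.Set.mem_ofList _ _).1 h)
      unfold PySem.Set.add PySem.Set.contains
      rw [hc]
      simp
    have hc0nD : key x ∉ D := by
      rw [hDdef, PySem.List.mem_sorted]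
      intro h
      exact hmem ((PySem.Set.mem_ofList _ _).1 h)
    have hRdlt : ∀ c ∈ Rd, c < key x := by
      rw [hRdef]
      exact pv_dropWhile_lt (key x) D hD hc0nD
    have hD' : PySem.List.sorted (PySem.Set.ofList (l.map key) ++ [key x]) (fun c => c) true
        = T ++ key x :: Rd := by
      apply PySem.List.sorted_rev_eq_of_perm_of_pairwise_gt
      · have p1 : (T ++ key x :: Rd).Perm (key x :: (T ++ Rd)) := List.perm_middle
        have p2 : (key x :: (T ++ Rd)).Perm ((T ++ Rd) ++ [key x]) := by
          simpa using List.perm_append_comm (l₁ := [key x]) (l₂ := T ++ Rd)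
        have p3 : ((T ++ Rd) ++ [key x]).Perm (PySem.Set.ofList (l.map key) ++ [key x]) := by
          rw [hTR]
          exact hperm.append_right _
        exact (p1.trans p2).trans p3
      · rw [List.pairwise_append]
        refine ⟨?_, ?_, ?_⟩
        · rw [hTdef]; exact List.Pairwise.sublist (List.takeWhile_sublist _) hD
        · rw [List.pairwise_cons]
          exact ⟨hRdlt, hpairRd⟩
        · intro a ha b hb
          rcases List.mem_cons.1 hb with hb | hb
          · exact hb ▸ hT a ha
          · exact hcross a ha b hb
    have hbktx : l.filter (fun a => key a == key x) = [] := by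
      rw [List.filter_eq_nil_iff]
      intro a ha h
      exact hmem (List.mem_map.2 ⟨a, ha, beq_iff_eq.1 h⟩)
    unfold pvGroups
    rw [hS, hD', ← hDdef, ← hTR]
    simp only [List.flatMap_append, List.flatMap_cons]
    rw [pv_insertBy_skip _ _ _ _ hskipT]
    rw [pv_insertBy_head _ _ _ (by
      intro a ha
      rcases List.mem_flatMap.1 ha with ⟨c, hc, hac⟩
      have h1 := pv_bucket_key key l c a hac
      have h2 := hRdlt c hc
      simp only [decide_eq_true_eq]
      omega)]
    simp only [hbkt]
    rw [pv_flatMap_congr T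
      (fun c => l.filter (fun a => key a == c) ++ (if key x == c then [x] else []))
      (fun c => l.filter (fun a => key a == c)) hTcongr]
    rw [pv_flatMap_congr Rd
      (fun c => l.filter (fun a => key a == c) ++ (if key x == c then [x] else []))
      (fun c => l.filter (fun a => key a == c)) (by
        intro c hc
        have hne : (key x == c) = false := by
          have := hRdlt c hc
          simp only [beq_eq_false_iff_ne, ne_eq]
          omega
        simp [hne])]
    simp [hbktx]

theorem pv_sorted_groups {α : Type} (key : α → Int) (l : List α) :
    PySem.List.sorted l key true = pvGroups key l := by
  induction l using List.reverseRecOn with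
  | nil => rfl
  | append_singleton t x ih =>
    rw [PySem.List.sorted_rev_eq_foldl_insertBy, List.foldl_append, List.foldl_cons, List.foldl_nil,
      ← PySem.List.sorted_rev_eq_foldl_insertBy, ih]
    exact pv_insert_groups key t x

-- filtering the sorted distinct keys = sorted distinct filtered keys
theorem pv_filter_sorted_set (lk : List Int) (p : Int → Bool) :
    (PySem.List.sorted (PySem.Set.ofList lk) (fun c => c) true).filter p
      = PySem.List.sorted (PySem.Set.ofList (lk.filter p)) (fun c => c) true := by
  symm
  apply PySem.List.sorted_rev_eq_of_perm_of_pairwise_gt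
  · rw [List.perm_ext_iff_of_nodup ((pv_sorted_set_nodup lk).filter p) (PySem.Set.nodup_ofList _)]
    intro a
    simp [List.mem_filter, PySem.List.mem_sorted, PySem.Set.mem_ofList]
  · exact (pv_sorted_set_pairwise_gt lk).sublist List.filter_sublist

-- ---- main theorem ----

theorem pv_main (f : Int → Int) (rd : List Int) (mk : Int) :
    (if mk ≤ ((((PySem.List.enumerate rd).filter (fun p => decide (1 < f p.2))).map (·.1)).length : Int)
      then ((PySem.List.enumerate rd).filter (fun p => decide (1 < f p.2))).map (·.1)
      else pvLoopA mk (PySem.List.sorted (PySem.List.enumerate rd) (fun x => f x.2) true)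
        (((PySem.List.enumerate rd).filter (fun p => decide (1 < f p.2))).map (·.1)))
    = (if mk ≤ ((((PySem.List.enumerate (rd.map f)).filter (fun p => decide (1 < p.2))).map (·.1)).length : Int)
      then ((PySem.List.enumerate (rd.map f)).filter (fun p => decide (1 < p.2))).map (·.1)
      else ((PySem.List.enumerate (rd.map f)).filter (fun p => decide (1 < p.2))).map (·.1)
        ++ PySem.List.slice
          ((PySem.List.sorted (PySem.Set.ofList ((rd.map f).filter (fun c => decide (c ≤ 1)))) (fun c => c) true).flatMap
            (fun c => ((PySem.List.enumerate (rd.map f)).filter (fun p => p.2 == c)).map (·.1)))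
          none (some (mk - ((((PySem.List.enumerate (rd.map f)).filter (fun p => decide (1 < p.2))).map (·.1)).length : Int)))) := by
  have hkeep : ((PySem.List.enumerate (rd.map f)).filter (fun p => decide (1 < p.2))).map (·.1)
      = ((PySem.List.enumerate rd).filter (fun p => decide (1 < f p.2))).map (·.1) := by
    rw [pv_enum_map, List.filter_map, List.map_map]
    rfl
  rw [hkeep]
  have hbB : (fun c => ((PySem.List.enumerate (rd.map f)).filter (fun p => p.2 == c)).map (·.1))
      = (fun c => ((PySem.List.enumerate rd).filter (fun p => f p.2 == c)).map Prod.fst) := by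
    funext c
    rw [pv_enum_map, List.filter_map, List.map_map]
    rfl
  rw [hbB]
  set desired := ((PySem.List.enumerate rd).filter (fun p => decide (1 < f p.2))).map (·.1) with hdes
  by_cases hge : mk ≤ (desired.length : Int)
  · rw [if_pos hge, if_pos hge]
  · rw [if_neg hge, if_neg hge]
    have hndE : ((PySem.List.enumerate rd).map Prod.fst).Nodup := pv_enum_fst_nodup rd 0
    have hpermsd : (PySem.List.sorted (PySem.List.enumerate rd) (fun x => f x.2) true).Perm
        (PySem.List.enumerate rd) := PySem.List.sorted_perm _ _ _
    have hnds : ((PySem.List.sorted (PySem.List.enumerate rd) (fun x => f x.2) true).map Prod.fst).Nodup :=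
      (hpermsd.map Prod.fst).nodup_iff.2 hndE
    have hlt : (desired.length : Int) < mk := by omega
    rw [pv_loopA_spec mk _ desired hnds hlt]
    rw [PySem.List.slice_to _ (by omega : (0:Int) ≤ mk - (desired.length : Int))]
    congr 1
    congr 1
    -- core: the filtered sorted index list is the grouped-buckets list
    rw [List.filter_map]
    rw [show (PySem.List.sorted (PySem.List.enumerate rd) (fun x => f x.2) true).filter
          ((fun i => decide (i ∉ desired)) ∘ Prod.fst)
        = (PySem.List.sorted (PySem.List.enumerate rd) (fun x => f x.2) true).filter
          (fun p => decide (f p.2 ≤ 1)) from List.filter_congr (by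
      intro p hp
      have hpE : p ∈ PySem.List.enumerate rd := hpermsd.mem_iff.1 hp
      have hiff := pv_mem_keep_iff (PySem.List.enumerate rd)
        (fun p => decide (1 < f p.2)) hndE p hpE
      by_cases h : 1 < f p.2
      · have hm : p.1 ∈ desired := by
          rw [hdes]
          exact hiff.2 (by simpa using h)
        simp only [Function.comp_apply, hm, not_true_eq_false, decide_false]
        have : ¬ f p.2 ≤ 1 := by omega
        simp [this]
      · have hm : p.1 ∉ desired := by
          rw [hdes]
          intro hmm
          exact h (by simpa using hiff.1 hmm)
        simp only [Function.comp_apply, hm, not_false_eq_true, decide_true]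
        have : f p.2 ≤ 1 := by omega
        simp [this])]
    rw [pv_sorted_groups (fun x => f x.2) (PySem.List.enumerate rd)]
    unfold pvGroups
    rw [List.filter_flatMap]
    rw [pv_flatMap_congr _
      (fun c => ((PySem.List.enumerate rd).filter (fun a => f a.2 == c)).filter (fun p => decide (f p.2 ≤ 1)))
      (fun c => if decide (c ≤ 1) then (PySem.List.enumerate rd).filter (fun a => f a.2 == c) else []) (by
        intro c _
        change List.filter (fun p => decide (f p.2 ≤ 1)) (List.filter (fun a => f a.2 == c) (PySem.List.enumerate rd))
          = if decide (c ≤ 1) = true then List.filter (fun a => f a.2 == c) (PySem.List.enumerate rd) else []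
        by_cases hc : c ≤ 1
        · rw [if_pos (by simpa using hc)]
          apply List.filter_eq_self.2
          intro a ha
          have hbk : f a.2 = c := by simpa using pv_bucket_key (fun x => f x.2) (PySem.List.enumerate rd) c a ha
          simp only [decide_eq_true_eq]
          omega
        · rw [if_neg (by simpa using hc), List.filter_eq_nil_iff]
          intro a ha
          have hbk : f a.2 = c := by simpa using pv_bucket_key (fun x => f x.2) (PySem.List.enumerate rd) c a ha
          simp only [decide_eq_true_eq]
          omega)]
    rw [pv_flatMap_ite _ (fun c => decide (c ≤ 1))]
    rw [pv_filter_sorted_set ((PySem.List.enumerate rd).map (fun x => f x.2)) (fun c => decide (c ≤ 1))]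
    rw [show (PySem.List.enumerate rd).map (fun x => f x.2) = rd.map f by
      rw [show (fun x : Int × Int => f x.2) = f ∘ Prod.snd from rfl, ← List.map_map, pv_enum_snd]]
    rw [List.map_flatMap]

-- ===== VERDICT (by name: the statement is the Claim_ definition above) =====
theorem select_keep_indices_py_spec : Claim_equal_select_keep_indices_py := by
  intro rolled_dice counts min_keeps _
  unfold Spec_select_keep_indices_py select_keep_indices_py select_keep_indices_py_alt
  exact pv_main (fun v => PySem.Dict.getD (PySem.Dict.mk counts) v 0) rolled_dice min_keeps
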